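-- pv_equiv track=rewrite | github.com/yasminekanzari/TP2 | Exercice5.py | analyser_commentaire
-- ===== SOURCE A (Python) =====
-- def analyser_commentaire(commentaire, mots_cles):
--     """
--     Analyse un commentaire client et calcule un score de satisfaction.
--
--     Args:
--         commentaire (str): Le commentaire du client
--         mots_cles (dict): Dictionnaire {mot: score}
--                          Positif si score > 0, négatif si score < 0
--
--     Returns:
--         tuple: (score_total, mots_trouves)
--     """
--     score_total = 5  # Score de base
--     mots_trouves = []
--
--     # On convertit le commentaire en minuscules
--     commentaire_lower = commentaire.lower()
--
--     # On crée une version du commentaire avec espaces autour pour faciliter la recherche, donc on remplace la ponctuation par des espaces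
--     commentaire_modifie = commentaire_lower
--     for char in '.,!?;:()[]{}"\'-':
--         commentaire_modifie = commentaire_modifie.replace(char, ' ')
--
--     # On divise en mots pour une recherche plus précise
--     mots_commentaire = commentaire_modifie.split()
--
--     #TODO : Rechercher chaque mot-clé dans le commentaire
--         # D'abord, vérifier la correspondance exacte dans la liste des mots
--         # Sinon, vérifier si le mot-clé est le début d'un mot du commentaire (cela permet de trouver "froid" dans "froide" ou "froids"), pour cela utiliser la méthode startswith().
--     # Borner le score final entre 0 et 10
--     for mots_cles, score in mots_cles.items():
--         for mot in mots_commentaire: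
--             if mot == mots_cles or mot.startswith(mots_cles):
--                 score_total += score
--                 mots_trouves.append(mots_cles)
--
--     if score_total > 10:
--          score_total = 10
--     if score_total < 0:
--          score_total = 0
--
--
--     return score_total, mots_trouves
-- ===== SOURCE B (Python) =====
-- def analyser_commentaire(commentaire, mots_cles):
--     # Count each distinct word once, then score every keyword against the
--     # word-count table (duplicates collapse); clamp with min/max at the end.
--     texte = commentaire.lower()
--     for ch in '.,!?;:()[]{}"\'-':
--         texte = texte.replace(ch, ' ')
--     compte = {}
--     for mot in texte.split():
--         compte[mot] = compte.get(mot, 0) + 1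
--     score_total = 5
--     mots_trouves = []
--     for mot_cle, score in mots_cles.items():
--         c = 0
--         for mot, n in compte.items():
--             if mot.startswith(mot_cle):
--                 c += n
--         score_total += score * c
--         mots_trouves.extend([mot_cle] * c)
--     return max(0, min(10, score_total)), mots_trouves
-- ===== Notes on version B (the rewrite author's own statement) =====
-- stated objective: alternative
-- what changed: B builds a word->count dictionary in one pass and scores each keyword against the distinct words only (score added by multiplication, matches emitted by list replication, final clamp via min/max), instead of A's per-keyword scan over every word occurrence with per-match increments and appends.
import Mathlib
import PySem

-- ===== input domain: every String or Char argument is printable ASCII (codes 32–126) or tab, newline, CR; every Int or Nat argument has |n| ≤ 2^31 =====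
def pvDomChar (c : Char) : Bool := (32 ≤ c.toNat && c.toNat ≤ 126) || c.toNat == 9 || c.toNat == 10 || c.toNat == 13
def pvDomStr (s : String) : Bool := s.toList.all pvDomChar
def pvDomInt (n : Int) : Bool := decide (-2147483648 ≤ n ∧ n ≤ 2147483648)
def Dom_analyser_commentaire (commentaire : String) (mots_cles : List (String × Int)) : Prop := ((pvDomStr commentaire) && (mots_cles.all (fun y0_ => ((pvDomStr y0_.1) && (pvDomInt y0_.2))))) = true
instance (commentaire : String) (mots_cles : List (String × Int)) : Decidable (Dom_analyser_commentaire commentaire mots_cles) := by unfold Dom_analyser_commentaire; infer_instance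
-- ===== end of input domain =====

-- B rescoring: builds a word-count dictionary once and scores each keyword against the
-- distinct words (score by multiplication, matches by replication), instead of A's
-- per-keyword scan over every word occurrence; clamping via min/max. Objective: alternative.


-- ===== PORT A =====
-- mots_cles is a Python dict: its items() are (PySem.Dict.ofList mots_cles).items
def analyser_commentaire (commentaire : String) (mots_cles : List (String × Int)) : Int × List String :=
  let commentaire_lower := PySem.Str.lower commentaire
  let commentaire_modifie :=
    (".,!?;:()[]{}\"'-".toList).foldl
      (fun s ch => PySem.Str.replace s (String.ofList [ch]) " ") commentaire_lower
  let mots_commentaire := PySem.Str.split₀ commentaire_modifie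
  let r := (PySem.Dict.ofList mots_cles).items.foldl
    (fun acc kv =>
      mots_commentaire.foldl
        (fun acc2 mot =>
          if mot == kv.1 || PySem.Str.startswith mot kv.1 then
            (acc2.1 + kv.2, acc2.2 ++ [kv.1])
          else acc2) acc)
    ((5 : Int), ([] : List String))
  let st := if r.1 > 10 then (10 : Int) else r.1
  let st := if st < 0 then (0 : Int) else st
  (st, r.2)

-- ===== PORT B =====
def analyser_commentaire_alt (commentaire : String) (mots_cles : List (String × Int)) : Int × List String :=
  let texte := PySem.Str.lower commentaire
  let texte :=
    (".,!?;:()[]{}\"'-".toList).foldl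
      (fun s ch => PySem.Str.replace s (String.ofList [ch]) " ") texte
  let compte : PySem.Dict String Int :=
    (PySem.Str.split₀ texte).foldl (fun d mot => d.insert mot (d.getD mot 0 + 1)) PySem.Dict.empty
  let r := (PySem.Dict.ofList mots_cles).items.foldl
    (fun acc kv =>
      let c := compte.items.foldl
        (fun c mn => if PySem.Str.startswith mn.1 kv.1 then c + mn.2 else c) (0 : Int)
      (acc.1 + kv.2 * c, acc.2 ++ List.replicate c.toNat kv.1))
    ((5 : Int), ([] : List String))
  (max 0 (min 10 r.1), r.2)

-- ===== PRECONDITION & SPEC =====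
def Spec_analyser_commentaire (commentaire : String) (mots_cles : List (String × Int)) (out : Int × List String) : Prop := out = analyser_commentaire_alt commentaire mots_cles
instance (commentaire : String) (mots_cles : List (String × Int)) (out : Int × List String) : Decidable (Spec_analyser_commentaire commentaire mots_cles out) := by unfold Spec_analyser_commentaire; infer_instance

-- ===== CLAIM (what is proved, stated in full; the proofs are below) =====
def Claim_equal_analyser_commentaire : Prop := ∀ (commentaire : String) (mots_cles : List (String × Int)), Dom_analyser_commentaire commentaire mots_cles → Spec_analyser_commentaire commentaire mots_cles (analyser_commentaire commentaire mots_cles)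

-- ===== LEMMAS AND PROOFS =====

-- A's test 'mot == kv.1 || mot.startswith(kv.1)' is just startswith.
lemma cond_eq (w kw : String) :
    (w == kw || PySem.Str.startswith w kw) = PySem.Str.startswith w kw := by
  cases h : (w == kw)
  · simp
  · have : w = kw := by exact eq_of_beq h
    subst this
    simp [PySem.Chars.startswith_iff]

-- A's inner loop over the words, in closed form.
lemma innerA (ws : List String) (kw : String) (s : Int) :
    ∀ acc : Int × List String,
      ws.foldl
        (fun acc2 mot =>
          if mot == kw || PySem.Str.startswith mot kw then (acc2.1 + s, acc2.2 ++ [kw]) else acc2) acc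
      = (acc.1 + s * (ws.countP (fun w => PySem.Str.startswith w kw) : Int),
         acc.2 ++ List.replicate (ws.countP (fun w => PySem.Str.startswith w kw)) kw) := by
  induction ws with
  | nil => intro acc; simp
  | cons w t ih =>
    intro acc
    rw [List.foldl_cons, List.countP_cons, cond_eq]
    cases h : PySem.Str.startswith w kw
    · simp only [if_neg Bool.false_ne_true, Nat.add_zero]
      exact ih acc
    · rw [ih]
      refine Prod.ext ?_ ?_
      · show acc.1 + s + s * ((t.countP _ : Nat) : Int) = acc.1 + s * (((t.countP _ + 1 : Nat)) : Int)
        push_cast; ring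
      · show acc.2 ++ [kw] ++ List.replicate (t.countP _) kw
            = acc.2 ++ List.replicate (t.countP _ + 1) kw
        rw [List.append_assoc]
        congr 1

-- indicator sum over a Nodup list containing w
lemma sum_indicator (p : String → Bool) (w : String) :
    ∀ l : List String, l.Nodup → w ∈ l →
      (l.map (fun k => if p k && (k == w) then (1 : Int) else 0)).sum
        = if p w then (1 : Int) else 0 := by
  intro l
  induction l with
  | nil => intro _ h; cases h
  | cons a rest ih =>
    intro hnd hmem
    rcases List.nodup_cons.mp hnd with ⟨hna, hndr⟩
    rw [List.map_cons, List.sum_cons]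
    rcases List.mem_cons.mp hmem with h | h
    · subst h
      have hz : (rest.map (fun k => if p k && (k == w) then (1 : Int) else 0)).sum = 0 := by
        apply List.sum_eq_zero
        intro x hx
        rcases List.mem_map.mp hx with ⟨k, hk, rfl⟩
        have hkw : (k == w) = false := by
          cases he : (k == w)
          · rfl
          · exact absurd (show w ∈ rest from eq_of_beq he ▸ hk) hna
        rw [hkw, Bool.and_false, if_neg Bool.false_ne_true]
      rw [hz, add_zero, BEq.rfl, Bool.and_true]
    · have haw : (a == w) = false := by
        cases he : (a == w)
        · rfl
        · exact absurd (show a ∈ rest from (eq_of_beq he).symm ▸ h) hna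
      rw [haw, Bool.and_false, if_neg Bool.false_ne_true, zero_add, ih hndr h]

-- summing per-word counts of the matching distinct words counts the matching occurrences
lemma sum_counts (p : String → Bool) (ws : List String) :
    ∀ l : List String, l.Nodup → (∀ w ∈ ws, w ∈ l) →
      (l.map (fun k => if p k then (ws.count k : Int) else 0)).sum
        = (ws.countP p : Int) := by
  induction ws with
  | nil =>
    intro l _ _
    simp
  | cons w t ih =>
    intro l hnd hsub
    have hwl : w ∈ l := hsub w List.mem_cons_self
    have hsub' : ∀ x ∈ t, x ∈ l := fun x hx => hsub x (List.mem_cons_of_mem _ hx)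
    have hsplit : ∀ k : String,
        (if p k then ((w :: t).count k : Int) else 0)
        = (if p k then (t.count k : Int) else 0) + (if p k && (k == w) then (1 : Int) else 0) := by
      intro k
      rw [List.count_cons]
      cases hp : p k <;> cases hk : (k == w) <;> simp [hp]
      · intro e; rw [e] at hk; simp at hk
      · exact (eq_of_beq hk).symm
    calc (l.map (fun k => if p k then ((w :: t).count k : Int) else 0)).sum
        = (l.map (fun k => (if p k then (t.count k : Int) else 0)
            + (if p k && (k == w) then (1 : Int) else 0))).sum := by
          congr 1; exact List.map_congr_left (fun k _ => hsplit k)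
      _ = (l.map (fun k => if p k then (t.count k : Int) else 0)).sum
            + (l.map (fun k => if p k && (k == w) then (1 : Int) else 0)).sum := by
          rw [← List.sum_map_add]
      _ = (t.countP p : Int) + (if p w then (1 : Int) else 0) := by
          rw [ih l hnd hsub', sum_indicator p w l hnd hwl]
      _ = ((w :: t).countP p : Int) := by
          rw [List.countP_cons]
          cases hp : p w <;> simp [hp]

-- B's inner sum over the word-count dictionary, in closed form.
lemma innerB (ws : List String) (kw : String) :
    (ws.foldl (fun d mot => d.insert mot (d.getD mot 0 + 1))
        (PySem.Dict.empty : PySem.Dict String Int)).items.foldl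
      (fun c mn => if PySem.Str.startswith mn.1 kw then c + mn.2 else c) (0 : Int)
    = (ws.countP (fun w => PySem.Str.startswith w kw) : Int) := by
  rw [PySem.Dict.foldl_insert_getD_add_one_eq_counter, PySem.Dict.items_counter]
  rw [List.foldl_map]
  have hstep : ∀ (c : Int) (k : String),
      (if PySem.Str.startswith k kw then c + (ws.count k : Int) else c)
      = c + (if PySem.Str.startswith k kw then (ws.count k : Int) else 0) := by
    intro c k; cases h : PySem.Str.startswith k kw <;> simp
  calc ((PySem.Set.ofList ws : List String)).foldl
        (fun c k => if PySem.Str.startswith k kw then c + (ws.count k : Int) else c) 0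
      = ((PySem.Set.ofList ws : List String)).foldl
        (fun c k => c + (if PySem.Str.startswith k kw then (ws.count k : Int) else 0)) 0 := by
        apply PySem.List.foldl_congr_mem
        intro c k _
        exact hstep c k
    _ = 0 + (((PySem.Set.ofList ws : List String)).map
        (fun k => if PySem.Str.startswith k kw then (ws.count k : Int) else 0)).sum := by
        exact PySem.List.foldl_add _ _ _
    _ = (ws.countP (fun w => PySem.Str.startswith w kw) : Int) := by
        rw [zero_add]
        exact sum_counts _ ws _ (PySem.Set.nodup_ofList ws)
          (fun w hw => (PySem.Set.mem_ofList ws w).mpr hw)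

lemma clamp_eq (r : Int) :
    (if (if r > 10 then (10 : Int) else r) < 0 then (0 : Int) else (if r > 10 then (10 : Int) else r))
      = max 0 (min 10 r) := by
  split_ifs <;> omega

-- ===== VERDICT (by name: the statement is the Claim_ definition above) =====
theorem analyser_commentaire_spec : Claim_equal_analyser_commentaire := by
  intro commentaire mots_cles _
  unfold Spec_analyser_commentaire analyser_commentaire analyser_commentaire_alt
  simp only []
  generalize (".,!?;:()[]{}\"'-".toList).foldl
      (fun s ch => PySem.Str.replace s (String.ofList [ch]) " ") (PySem.Str.lower commentaire) = texte
  generalize hws : PySem.Str.split₀ texte = ws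
  have hfold : ∀ acc : Int × List String,
      (PySem.Dict.ofList mots_cles).items.foldl
        (fun acc kv =>
          ws.foldl
            (fun acc2 mot =>
              if mot == kv.1 || PySem.Str.startswith mot kv.1 then
                (acc2.1 + kv.2, acc2.2 ++ [kv.1])
              else acc2) acc) acc
      = (PySem.Dict.ofList mots_cles).items.foldl
        (fun acc kv =>
          let c := (ws.foldl (fun d mot => d.insert mot (d.getD mot 0 + 1))
              (PySem.Dict.empty : PySem.Dict String Int)).items.foldl
            (fun c mn => if PySem.Str.startswith mn.1 kv.1 then c + mn.2 else c) (0 : Int)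
          (acc.1 + kv.2 * c, acc.2 ++ List.replicate c.toNat kv.1)) acc := by
    intro acc
    apply PySem.List.foldl_congr_mem
    intro acc kv _
    rw [innerA ws kv.1 kv.2 acc, innerB ws kv.1]
    simp
  rw [hfold]
  generalize (PySem.Dict.ofList mots_cles).items.foldl _ ((5 : Int), ([] : List String)) = r
  exact Prod.ext (clamp_eq r.1) rfl
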